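-- pv_equiv track=rewrite | github.com/diffarydk/prediction | models/xgboost_model.py | _detect_dragon
-- ===== SOURCE A (Python) =====
-- def _detect_dragon(row):
--     """Detect 'dragon' pattern (streak of banker or player)."""
--     for outcome in [0, 1]:  # Check banker and player only
--         streak = 0
--         max_streak = 0
--
--         for val in row:
--             if val == outcome:
--                 streak += 1
--                 max_streak = max(max_streak, streak)
--             else:
--                 streak = 0
--
--         if max_streak >= 3:
--             return 1
--
--     return 0
-- ===== SOURCE B (Python) =====
-- def _detect_dragon(row):
--     """Detect 'dragon' pattern (streak of banker or player) in one run-length pass."""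
--     prev = None
--     streak = 0
--     for val in row:
--         streak = streak + 1 if val == prev else 1
--         prev = val
--         if streak >= 3 and val in (0, 1):
--             return 1
--     return 0
-- ===== Notes on version B (the rewrite author's own statement) =====
-- stated objective: alternative
-- what changed: Replaced A's two sequential outcome-specific max-streak scans with a single run-length pass keeping prev/streak that returns 1 as soon as a run of 3+ bankers or players is seen.
import Mathlib
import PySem

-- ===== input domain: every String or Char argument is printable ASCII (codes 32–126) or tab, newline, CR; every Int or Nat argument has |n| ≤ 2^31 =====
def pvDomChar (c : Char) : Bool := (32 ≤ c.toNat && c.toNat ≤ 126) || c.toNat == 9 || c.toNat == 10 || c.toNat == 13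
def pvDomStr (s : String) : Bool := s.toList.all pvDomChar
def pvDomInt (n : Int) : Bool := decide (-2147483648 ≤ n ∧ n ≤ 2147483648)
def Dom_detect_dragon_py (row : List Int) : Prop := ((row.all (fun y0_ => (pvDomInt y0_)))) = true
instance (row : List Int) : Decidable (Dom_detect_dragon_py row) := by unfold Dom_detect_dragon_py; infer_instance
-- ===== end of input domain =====

-- B makes one run-length pass (prev/streak, early return) instead of A's two outcome-specific scans.

-- ===== PORT A =====
-- inner 'for val in row' loop of A, for a fixed outcome, carrying (streak, max_streak)
def loopA (outcome streak maxStreak : Int) : List Int → Int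
  | [] => maxStreak
  | v :: rest =>
    if v = outcome then loopA outcome (streak + 1) (max maxStreak (streak + 1)) rest
    else loopA outcome 0 maxStreak rest

-- 'for outcome in [0, 1]' unrolled: return 1 at the first outcome whose max_streak ≥ 3
def detect_dragon_py (row : List Int) : Int :=
  if loopA 0 0 0 row ≥ 3 then 1
  else if loopA 1 0 0 row ≥ 3 then 1
  else 0

-- ===== PORT B =====
-- B's single loop: prev is None initially ('val == None' is False in Python), early return on a run of 3+ of 0/1
def altLoop (prev : Option Int) (streak : Int) : List Int → Int
  | [] => 0
  | v :: rest =>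
    let s := if some v = prev then streak + 1 else 1
    if s ≥ 3 ∧ (v = 0 ∨ v = 1) then 1
    else altLoop (some v) s rest

def detect_dragon_py_alt (row : List Int) : Int := altLoop none 0 row

-- ===== PRECONDITION & SPEC =====
def Spec_detect_dragon_py (row : List Int) (out : Int) : Prop := out = detect_dragon_py_alt row
instance (row : List Int) (out : Int) : Decidable (Spec_detect_dragon_py row out) := by unfold Spec_detect_dragon_py; infer_instance

-- ===== CLAIM (what is proved, stated in full; the proofs are below) =====
def Claim_equal_detect_dragon_py : Prop := ∀ (row : List Int), Dom_detect_dragon_py row → Spec_detect_dragon_py row (detect_dragon_py row)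

-- ===== LEMMAS AND PROOFS =====

-- maximal run length of value c in l, where the first run is extended by a carry s
def gRun (c s : Int) : List Int → Int
  | [] => s
  | v :: rest => if v = c then gRun c (s + 1) rest else max s (gRun c 0 rest)

theorem gRun_cons_self (c s : Int) (rest : List Int) :
    gRun c s (c :: rest) = gRun c (s + 1) rest := by simp [gRun]

theorem gRun_cons_ne (c s v : Int) (rest : List Int) (h : ¬ v = c) :
    gRun c s (v :: rest) = max s (gRun c 0 rest) := by simp [gRun, h]

theorem altLoop_cons_self (c s : Int) (rest : List Int) :
    altLoop (some c) s (c :: rest) =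
      if s + 1 ≥ 3 ∧ (c = 0 ∨ c = 1) then 1 else altLoop (some c) (s + 1) rest := by
  simp [altLoop]

theorem altLoop_cons_ne (c s v : Int) (rest : List Int) (h : ¬ v = c) :
    altLoop (some c) s (v :: rest) = altLoop (some v) 1 rest := by
  norm_num [altLoop, h]

theorem altLoop_none_cons (v : Int) (rest : List Int) :
    altLoop none 0 (v :: rest) = altLoop (some v) 1 rest := by
  norm_num [altLoop]

theorem gRun_ge (c : Int) : ∀ (l : List Int) (s : Int), 0 ≤ s → s ≤ gRun c s l := by
  intro l
  induction l with
  | nil => intro s hs; simp [gRun]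
  | cons v rest ih =>
    intro s hs
    by_cases h : v = c
    · subst h; rw [gRun_cons_self]
      exact le_trans (by omega) (ih (s + 1) (by omega))
    · rw [gRun_cons_ne c s v rest h]; exact le_max_left _ _

theorem gRun_mono (c : Int) : ∀ (l : List Int) (s t : Int), 0 ≤ s → s ≤ t → gRun c s l ≤ gRun c t l := by
  intro l
  induction l with
  | nil => intro s t _ h; simpa [gRun] using h
  | cons v rest ih =>
    intro s t hs hst
    by_cases h : v = c
    · subst h; rw [gRun_cons_self, gRun_cons_self]
      exact ih (s + 1) (t + 1) (by omega) (by omega)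
    · rw [gRun_cons_ne c s v rest h, gRun_cons_ne c t v rest h]
      exact max_le_max hst (le_refl _)

theorem loopA_eq (c : Int) : ∀ (l : List Int) (s m : Int), 0 ≤ s → s ≤ m →
    loopA c s m l = max m (gRun c s l) := by
  intro l
  induction l with
  | nil => intro s m hs hsm; simp [loopA, gRun]; omega
  | cons v rest ih =>
    intro s m hs hsm
    simp only [loopA]
    by_cases h : v = c
    · subst h
      rw [if_pos rfl, gRun_cons_self,
        ih (s + 1) (max m (s + 1)) (by omega) (le_max_right _ _)]
      have := gRun_ge v rest (s + 1) (by omega)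
      omega
    · rw [if_neg h, gRun_cons_ne c s v rest h, ih 0 m (le_refl _) (by omega)]
      have := gRun_ge c rest 0 (le_refl _)
      omega

theorem altLoop_eq : ∀ (l : List Int) (c s : Int), 1 ≤ s → ¬((c = 0 ∨ c = 1) ∧ s ≥ 3) →
    altLoop (some c) s l =
      if ((c = 0 ∨ c = 1) ∧ gRun c s l ≥ 3) ∨ gRun 0 0 l ≥ 3 ∨ gRun 1 0 l ≥ 3 then 1 else 0 := by
  intro l
  induction l with
  | nil =>
    intro c s hs hnc
    simp only [altLoop, gRun]
    rw [if_neg]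
    rintro (⟨h1, h2⟩ | h | h)
    · exact hnc ⟨h1, h2⟩
    · omega
    · omega
  | cons v rest ih =>
    intro c s hs hnc
    by_cases hvc : v = c
    · subst hvc
      rw [altLoop_cons_self]
      by_cases hret : (s + 1 ≥ 3 ∧ (v = 0 ∨ v = 1))
      · have hC : ((v = 0 ∨ v = 1) ∧ gRun v s (v :: rest) ≥ 3) ∨
            gRun 0 0 (v :: rest) ≥ 3 ∨ gRun 1 0 (v :: rest) ≥ 3 := by
          refine Or.inl ⟨hret.2, ?_⟩
          rw [gRun_cons_self]
          have := gRun_ge v rest (s + 1) (by omega)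
          omega
        rw [if_pos hret, if_pos hC]
      · rw [if_neg hret, ih v (s + 1) (by omega) (by tauto)]
        refine if_congr ?_ rfl rfl
        rw [gRun_cons_self]
        by_cases hv0 : v = 0
        · subst hv0
          have eB : gRun 0 0 ((0 : Int) :: rest) = gRun 0 1 rest := by
            simpa using gRun_cons_self 0 0 rest
          have eC : gRun 1 0 ((0 : Int) :: rest) = max 0 (gRun 1 0 rest) :=
            gRun_cons_ne 1 0 0 rest (by norm_num)
          have m1 := gRun_mono 0 rest 0 1 (le_refl _) (by omega)
          have m2 := gRun_mono 0 rest 1 (s + 1) (by omega) (by omega)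
          have hg1 := gRun_ge 1 rest 0 (le_refl _)
          rw [eB, eC]
          omega
        · by_cases hv1 : v = 1
          · subst hv1
            have eB : gRun 0 0 ((1 : Int) :: rest) = max 0 (gRun 0 0 rest) :=
              gRun_cons_ne 0 0 1 rest (by norm_num)
            have eC : gRun 1 0 ((1 : Int) :: rest) = gRun 1 1 rest := by
              simpa using gRun_cons_self 1 0 rest
            have m1 := gRun_mono 1 rest 0 1 (le_refl _) (by omega)
            have m2 := gRun_mono 1 rest 1 (s + 1) (by omega) (by omega)
            have hg0 := gRun_ge 0 rest 0 (le_refl _)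
            rw [eB, eC]
            omega
          · have eB : gRun 0 0 (v :: rest) = max 0 (gRun 0 0 rest) :=
              gRun_cons_ne 0 0 v rest hv0
            have eC : gRun 1 0 (v :: rest) = max 0 (gRun 1 0 rest) :=
              gRun_cons_ne 1 0 v rest hv1
            have hg0 := gRun_ge 0 rest 0 (le_refl _)
            have hg1 := gRun_ge 1 rest 0 (le_refl _)
            rw [eB, eC]
            omega
    · rw [altLoop_cons_ne c s v rest hvc, ih v 1 (le_refl _) (by omega)]
      refine if_congr ?_ rfl rfl
      have eD : gRun c s (v :: rest) = max s (gRun c 0 rest) := gRun_cons_ne c s v rest hvc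
      rw [eD]
      by_cases hv0 : v = 0
      · subst hv0
        have eB : gRun 0 0 ((0 : Int) :: rest) = gRun 0 1 rest := by
          simpa using gRun_cons_self 0 0 rest
        have eC : gRun 1 0 ((0 : Int) :: rest) = max 0 (gRun 1 0 rest) :=
          gRun_cons_ne 1 0 0 rest (by norm_num)
        have m1 := gRun_mono 0 rest 0 1 (le_refl _) (by omega)
        have hg1 := gRun_ge 1 rest 0 (le_refl _)
        rw [eB, eC]
        by_cases hc1 : c = 1
        · subst hc1; omega
        · have hc0 : ¬ c = 0 := fun h => hvc h.symm
          omega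
      · by_cases hv1 : v = 1
        · subst hv1
          have eB : gRun 0 0 ((1 : Int) :: rest) = max 0 (gRun 0 0 rest) :=
            gRun_cons_ne 0 0 1 rest (by norm_num)
          have eC : gRun 1 0 ((1 : Int) :: rest) = gRun 1 1 rest := by
            simpa using gRun_cons_self 1 0 rest
          have m1 := gRun_mono 1 rest 0 1 (le_refl _) (by omega)
          have hg0 := gRun_ge 0 rest 0 (le_refl _)
          rw [eB, eC]
          by_cases hc0 : c = 0
          · subst hc0; omega
          · have hc1 : ¬ c = 1 := fun h => hvc h.symm
            omega
        · have eB : gRun 0 0 (v :: rest) = max 0 (gRun 0 0 rest) :=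
            gRun_cons_ne 0 0 v rest hv0
          have eC : gRun 1 0 (v :: rest) = max 0 (gRun 1 0 rest) :=
            gRun_cons_ne 1 0 v rest hv1
          have hg0 := gRun_ge 0 rest 0 (le_refl _)
          have hg1 := gRun_ge 1 rest 0 (le_refl _)
          rw [eB, eC]
          by_cases hc0 : c = 0
          · subst hc0; omega
          · by_cases hc1 : c = 1
            · subst hc1; omega
            · omega

-- ===== VERDICT (by name: the statement is the Claim_ definition above) =====
theorem detect_dragon_py_spec : Claim_equal_detect_dragon_py := by
  intro row _
  unfold Spec_detect_dragon_py detect_dragon_py detect_dragon_py_alt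
  have hA0 : loopA 0 0 0 row = gRun 0 0 row := by
    rw [loopA_eq 0 row 0 0 (le_refl _) (le_refl _)]
    have := gRun_ge 0 row 0 (le_refl _); omega
  have hA1 : loopA 1 0 0 row = gRun 1 0 row := by
    rw [loopA_eq 1 row 0 0 (le_refl _) (le_refl _)]
    have := gRun_ge 1 row 0 (le_refl _); omega
  rw [hA0, hA1]
  cases row with
  | nil => simp [altLoop, gRun]
  | cons v rest =>
    rw [altLoop_none_cons, altLoop_eq rest v 1 (le_refl _) (by omega)]
    have collapse : (if gRun 0 0 (v :: rest) ≥ 3 then (1 : Int)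
        else if gRun 1 0 (v :: rest) ≥ 3 then 1 else 0)
        = if gRun 0 0 (v :: rest) ≥ 3 ∨ gRun 1 0 (v :: rest) ≥ 3 then 1 else 0 := by
      split_ifs <;> tauto
    rw [collapse]
    refine if_congr ?_ rfl rfl
    by_cases hv0 : v = 0
    · subst hv0
      have eB : gRun 0 0 ((0 : Int) :: rest) = gRun 0 1 rest := by
        simpa using gRun_cons_self 0 0 rest
      have eC : gRun 1 0 ((0 : Int) :: rest) = max 0 (gRun 1 0 rest) :=
        gRun_cons_ne 1 0 0 rest (by norm_num)
      have m1 := gRun_mono 0 rest 0 1 (le_refl _) (by omega)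
      have hg1 := gRun_ge 1 rest 0 (le_refl _)
      rw [eB, eC]
      omega
    · by_cases hv1 : v = 1
      · subst hv1
        have eB : gRun 0 0 ((1 : Int) :: rest) = max 0 (gRun 0 0 rest) :=
          gRun_cons_ne 0 0 1 rest (by norm_num)
        have eC : gRun 1 0 ((1 : Int) :: rest) = gRun 1 1 rest := by
          simpa using gRun_cons_self 1 0 rest
        have m1 := gRun_mono 1 rest 0 1 (le_refl _) (by omega)
        have hg0 := gRun_ge 0 rest 0 (le_refl _)
        rw [eB, eC]
        omega
      · have eB : gRun 0 0 (v :: rest) = max 0 (gRun 0 0 rest) :=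
          gRun_cons_ne 0 0 v rest hv0
        have eC : gRun 1 0 (v :: rest) = max 0 (gRun 1 0 rest) :=
          gRun_cons_ne 1 0 v rest hv1
        have hg0 := gRun_ge 0 rest 0 (le_refl _)
        have hg1 := gRun_ge 1 rest 0 (le_refl _)
        rw [eB, eC]
        omega
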